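-- pv_equiv track=rewrite | github.com/Honeybee1023/auto-email | auto_email/parser.py | _section_bounds
-- ===== SOURCE A (Python) =====
-- from typing import List, Optional, Tuple
--
-- SECTION_HEADERS = ["Work Information", "Personal Information", "MIT Information"]
--
-- def _section_bounds(text: str, header: str) -> Optional[tuple[int, int]]:
--     start = text.find(header)
--     if start == -1:
--         return None
--     start_end = start + len(header)
--     next_positions = [text.find(h, start_end) for h in SECTION_HEADERS if h != header]
--     next_positions = [p for p in next_positions if p != -1]
--     end = min(next_positions) if next_positions else len(text)
--     return start_end, end
-- ===== SOURCE B (Python) =====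
-- SECTION_HEADERS = ["Work Information", "Personal Information", "MIT Information"]
--
-- def _section_bounds(text, header):
--     start = text.find(header)
--     if start == -1:
--         return None
--     s = start + len(header)
--     others = tuple(h for h in SECTION_HEADERS if h != header)
--     for i in range(s, len(text)):
--         if text.startswith(others, i):
--             return (s, i)
--     return (s, len(text))
-- ===== Notes on version B (the rewrite author's own statement) =====
-- stated objective: alternative
-- what changed: Replaces the three separate text.find scans plus a min over the surviving positions by a single left-to-right scan from start_end that stops at the first position where any other section header starts (str.startswith with a tuple).
import Mathlib
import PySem

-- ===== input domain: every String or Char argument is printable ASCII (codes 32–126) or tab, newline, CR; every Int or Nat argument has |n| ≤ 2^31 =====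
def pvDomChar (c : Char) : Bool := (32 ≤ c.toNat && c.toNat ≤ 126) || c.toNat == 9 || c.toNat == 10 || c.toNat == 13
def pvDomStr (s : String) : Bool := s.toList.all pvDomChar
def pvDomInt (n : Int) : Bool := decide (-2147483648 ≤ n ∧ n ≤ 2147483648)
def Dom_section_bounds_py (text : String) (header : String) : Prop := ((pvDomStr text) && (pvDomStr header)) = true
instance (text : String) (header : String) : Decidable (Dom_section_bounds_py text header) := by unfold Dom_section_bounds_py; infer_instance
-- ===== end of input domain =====

-- B replaces three per-header find scans plus a min by one left-to-right scan for the first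
-- position where any other header starts (objective: alternative; same asymptotic cost).

def SECTION_HEADERS : List String := ["Work Information", "Personal Information", "MIT Information"]

-- ===== PORT A =====
def section_bounds_py (text : String) (header : String) : Option (Int × Int) :=
  let start := PySem.Str.find text header
  if start = -1 then none
  else
    let start_end := start + PySem.Str.len header
    let next_positions :=
      (SECTION_HEADERS.filter (fun h => h ≠ header)).map
        (fun h => PySem.Str.findFrom text h start_end)
    let next_positions := next_positions.filter (fun p => p ≠ -1)
    let e := match next_positions with          -- min(next_positions) if next_positions else len(text)
      | [] => PySem.Str.len text
      | x :: xs => xs.foldl min x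
    some (start_end, e)

-- ===== PORT B =====
-- the loop 'for i in range(s, len(text)): if text.startswith(others, i): return (s, i)';
-- text.startswith(h, i) with 0 ≤ i ≤ len(text) is exactly 'h.isPrefixOf (text.toList.drop i)'.
def sbAltScan (others : List (List Char)) (rest : List Char) (i : Int) : Int :=
  match rest with
  | [] => i
  | _ :: tail =>
      if others.any (fun h => PySem.Chars.startswith rest h) then i
      else sbAltScan others tail (i + 1)

def section_bounds_py_alt (text : String) (header : String) : Option (Int × Int) :=
  let start := PySem.Str.find text header
  if start = -1 then none
  else
    let s := start + PySem.Str.len header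
    let others := (SECTION_HEADERS.filter (fun h => h ≠ header)).map String.toList
    some (s, sbAltScan others (text.toList.drop s.toNat) s)

-- ===== PRECONDITION & SPEC =====
def Spec_section_bounds_py (text : String) (header : String) (out : Option (Int × Int)) : Prop := out = section_bounds_py_alt text header
instance (text : String) (header : String) (out : Option (Int × Int)) : Decidable (Spec_section_bounds_py text header out) := by unfold Spec_section_bounds_py; infer_instance

-- ===== CLAIM (what is proved, stated in full; the proofs are below) =====
def Claim_equal_section_bounds_py : Prop := ∀ (text : String) (header : String), Dom_section_bounds_py text header → Spec_section_bounds_py text header (section_bounds_py text header)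

-- ===== LEMMAS AND PROOFS =====

theorem sbAltScan_shift (H : List (List Char)) (t : List Char) (i : Int) :
    sbAltScan H t i = i + sbAltScan H t 0 := by
  induction t generalizing i with
  | nil => simp [sbAltScan]
  | cons c tail ih =>
    by_cases hyes : (H.any fun h => PySem.Chars.startswith (c :: tail) h) = true
    · simp only [sbAltScan]; rw [if_pos hyes, if_pos hyes]; omega
    · simp only [sbAltScan]; rw [if_neg hyes, if_neg hyes, ih, ih (0 + 1)]; ring

theorem sbAltScan0_bounds (H : List (List Char)) (t : List Char) :
    0 ≤ sbAltScan H t 0 ∧ sbAltScan H t 0 ≤ t.length := by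
  induction t with
  | nil => simp [sbAltScan]
  | cons c tail ih =>
    by_cases hyes : (H.any fun h => PySem.Chars.startswith (c :: tail) h) = true
    · simp only [sbAltScan]; rw [if_pos hyes]
      refine ⟨le_refl 0, ?_⟩
      positivity
    · simp only [sbAltScan, List.length_cons]
      rw [if_neg hyes, sbAltScan_shift]
      push_cast
      omega

theorem sbAltScan0_not_before (H : List (List Char)) (t : List Char) (j : Nat)
    (hj : (j : Int) < sbAltScan H t 0) : ¬ ∃ h ∈ H, h <+: t.drop j := by
  induction t generalizing j with
  | nil =>
    simp [sbAltScan] at hj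
    exact absurd hj (by omega)
  | cons c tail ih =>
    by_cases hyes : (H.any fun h => PySem.Chars.startswith (c :: tail) h) = true
    · simp only [sbAltScan] at hj
      rw [if_pos hyes] at hj
      exact absurd hj (by omega)
    · simp only [sbAltScan] at hj
      rw [if_neg hyes] at hj
      rw [sbAltScan_shift] at hj
      cases j with
      | zero =>
        simp only [List.drop_zero]
        rintro ⟨h, hmem, hpre⟩
        have hb : PySem.Chars.startswith (c :: tail) h = true := by
          simpa [PySem.Chars.startswith, List.isPrefixOf_iff_prefix] using hpre
        exact hyes (List.any_eq_true.2 ⟨h, hmem, hb⟩)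
      | succ j' =>
        have := ih j' (by push_cast at hj ⊢; omega)
        simpa using this

theorem sbAltScan0_match (H : List (List Char)) (t : List Char)
    (hlt : sbAltScan H t 0 < t.length) :
    ∃ h ∈ H, h <+: t.drop (sbAltScan H t 0).toNat := by
  induction t with
  | nil => simp [sbAltScan] at hlt
  | cons c tail ih =>
    by_cases hyes : (H.any fun h => PySem.Chars.startswith (c :: tail) h) = true
    · obtain ⟨h, hmem, hpre⟩ := List.any_eq_true.1 hyes
      refine ⟨h, hmem, ?_⟩
      simp only [sbAltScan]
      rw [if_pos hyes]
      simpa [PySem.Chars.startswith, List.isPrefixOf_iff_prefix] using hpre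
    · simp only [sbAltScan, List.length_cons] at hlt ⊢
      rw [if_neg hyes] at hlt ⊢
      rw [sbAltScan_shift] at hlt ⊢
      have h0 := sbAltScan0_bounds H tail
      have hlt' : sbAltScan H tail 0 < tail.length := by push_cast at hlt; omega
      obtain ⟨h, hmem, hpre⟩ := ih hlt'
      refine ⟨h, hmem, ?_⟩
      have hidx : (0 + 1 + sbAltScan H tail 0).toNat = (sbAltScan H tail 0).toNat + 1 := by
        omega
      rw [hidx]
      simpa using hpre

-- the filtered map of A collapses to a map over the headers that actually occur
theorem filter_map_findFrom (t : List Char) (n : Nat) (l : List String) :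
    ((l.map (fun h => if PySem.Chars.find t h.toList = -1 then (-1 : Int)
                      else (n : Int) + PySem.Chars.find t h.toList)).filter (fun p => p ≠ -1))
      = (l.filter (fun h => PySem.Chars.find t h.toList ≠ -1)).map
          (fun h => (n : Int) + PySem.Chars.find t h.toList) := by
  induction l with
  | nil => rfl
  | cons g l ih =>
    by_cases hg : PySem.Chars.find t g.toList = -1
    · simpa [hg] using ih
    · have hge : 0 ≤ PySem.Chars.find t g.toList := by
        have := PySem.Chars.neg_one_le_find t g.toList; omega
      have hne : ((n : Int) + PySem.Chars.find t g.toList ≠ -1) := by omega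
      simpa [hg, hne] using ih

theorem foldl_min_map_add (l : List Int) (c a : Int) :
    (l.map (fun v => c + v)).foldl min (c + a) = c + l.foldl min a := by
  induction l generalizing a with
  | nil => rfl
  | cons x xs ih =>
    simp only [List.map_cons, List.foldl_cons]
    rw [show min (c + a) (c + x) = c + min a x by omega, ih]

theorem headers_ne_nil (header : String) (g : String)
    (hg : g ∈ SECTION_HEADERS.filter (fun h => h ≠ header)) : g.toList ≠ [] := by
  have := List.mem_filter.1 hg |>.1
  simp only [SECTION_HEADERS, List.mem_cons, List.not_mem_nil, or_false] at this
  rcases this with h | h | h <;> subst h <;> decide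

-- ===== VERDICT (by name: the statement is the Claim_ definition above) =====
theorem section_bounds_py_spec : Claim_equal_section_bounds_py := by
  intro text header _
  unfold Spec_section_bounds_py section_bounds_py section_bounds_py_alt
  simp only []
  set start := PySem.Str.find text header with hstart
  by_cases h1 : start = -1
  · simp [h1]
  · simp only [h1, if_false]
    -- facts about start and s
    have hstart0 : 0 ≤ start := by
      have := PySem.Chars.neg_one_le_find text.toList header.toList
      simp only [hstart, PySem.Str.find] at *
      omega
    have hspec := PySem.Chars.find_spec (s := text.toList) (sub := header.toList)
      (by simpa [PySem.Str.find] using hstart0)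
    have hlen : start.toNat + header.toList.length ≤ text.toList.length := by
      have hp := hspec.1
      have := hp.length_le
      simp only [List.length_drop] at this
      have hle : start ≤ (text.toList.length : Int) := by
        have := PySem.Chars.find_le_length text.toList header.toList
        simpa [PySem.Str.find] using this
      have hcs : PySem.Chars.find text.toList header.toList = start := rfl
      rw [hcs] at this
      omega
    set s : Int := start + PySem.Str.len header with hs
    have hsl : s = start + (header.toList.length : Int) := by rw [hs]; rfl
    have hs0 : 0 ≤ s := by omega
    set n : Nat := s.toNat with hn
    have hsn : (n : Int) = s := Int.toNat_of_nonneg hs0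
    have hnle : n ≤ text.toList.length := by omega
    set t : List Char := text.toList.drop n with ht
    set H0 : List String := SECTION_HEADERS.filter (fun h => h ≠ header) with hH0
    -- rewrite each findFrom via findFrom_natCast
    have hmapeq : H0.map (fun h => PySem.Str.findFrom text h s)
        = H0.map (fun h => if PySem.Chars.find t h.toList = -1 then (-1 : Int)
                           else (n : Int) + PySem.Chars.find t h.toList) := by
      apply List.map_congr_left
      intro g _
      rw [← hsn]
      simpa [PySem.Str.findFrom, ht] using
        PySem.Chars.findFrom_natCast text.toList g.toList n hnle
    rw [hmapeq, filter_map_findFrom]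
    set L : List String := H0.filter (fun h => PySem.Chars.find t h.toList ≠ -1) with hL
    set m : Int := sbAltScan (H0.map String.toList) t 0 with hm
    have hmb := sbAltScan0_bounds (H0.map String.toList) t
    rw [show sbAltScan (H0.map String.toList) t s = s + m from sbAltScan_shift _ _ _]
    -- two cases: no other header occurs after s, or some does
    match hLs : L with
    | [] =>
      -- every other header is absent from t; the scan runs to the end
      have habs : ∀ g ∈ H0, PySem.Chars.find t g.toList = -1 := by
        intro g hg
        by_contra hne
        have : g ∈ L := List.mem_filter.2 ⟨hg, by simpa using hne⟩
        rw [hLs] at this; simp at this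
      have hmfull : m = t.length := by
        rcases lt_or_eq_of_le hmb.2 with hlt | he
        · exfalso
          obtain ⟨h, hmem, hpre⟩ := sbAltScan0_match _ _ hlt
          obtain ⟨g, hg, rfl⟩ := List.mem_map.1 hmem
          have : g.toList <:+: t := (hpre).isInfix.trans (List.drop_suffix _ _).isInfix
          exact absurd (habs g hg) (by
            rw [PySem.Chars.find_eq_neg_one_iff]
            simp [this])
        · exact he
      simp only [List.map_nil, hmfull]
      have hfull : PySem.Str.len text = s + (t.length : Int) := by
        simp only [PySem.Str.len, ht, List.length_drop]
        omega
      rw [hfull]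
    | y :: ys =>
      -- A's end is n + min of the finds; show that min equals the scan result m
      simp only [List.map_cons]
      rw [show ys.map (fun h => (n : Int) + PySem.Chars.find t h.toList)
            = (ys.map (fun h => PySem.Chars.find t h.toList)).map (fun v => (n : Int) + v) by
          rw [List.map_map]; rfl]
      rw [foldl_min_map_add]
      set M : Int := (ys.map (fun h => PySem.Chars.find t h.toList)).foldl min
        (PySem.Chars.find t y.toList) with hM
      have hLmem : ∀ g ∈ L, g ∈ H0 ∧ PySem.Chars.find t g.toList ≠ -1 := by
        intro g hg
        have := List.mem_filter.1 hg
        exact ⟨this.1, by simpa using this.2⟩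
      -- M is one of the finds
      have hMmem : ∃ g ∈ L, M = PySem.Chars.find t g.toList := by
        rcases PySem.List.foldl_min_mem (ys.map (fun h => PySem.Chars.find t h.toList))
          (PySem.Chars.find t y.toList) with h | h
        · exact ⟨y, by rw [hLs]; simp, h.symm ▸ rfl⟩
        · obtain ⟨g, hg, hgv⟩ := List.mem_map.1 h
          exact ⟨g, by rw [hLs]; simp [hg], by rw [hM, hgv]⟩
      -- M is ≤ every find
      have hMle : ∀ g ∈ L, M ≤ PySem.Chars.find t g.toList := by
        intro g hg
        rw [hLs] at hg
        rcases List.mem_cons.1 hg with rfl | hg'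
        · exact (PySem.List.foldl_min_le _ _).1
        · exact (PySem.List.foldl_min_le _ _).2 _ (List.mem_map.2 ⟨g, hg', rfl⟩)
      obtain ⟨g0, hg0L, hMg0⟩ := hMmem
      obtain ⟨hg0H, hg0ne⟩ := hLmem g0 hg0L
      have hM0 : 0 ≤ M := by
        rw [hMg0]
        have := PySem.Chars.neg_one_le_find t g0.toList
        omega
      have hg0spec := PySem.Chars.find_spec (s := t) (sub := g0.toList) (hMg0 ▸ hM0)
      have hg0pre : g0.toList <+: t.drop M.toNat := by rw [hMg0]; exact hg0spec.1
      have hMlt : M.toNat < t.length := by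
        by_contra hge
        have : t.drop M.toNat = [] := List.drop_eq_nil_of_le (by omega)
        rw [this] at hg0pre
        exact headers_ne_nil header g0 hg0H (List.prefix_nil.1 hg0pre)
      -- m ≤ M
      have hmleM : m ≤ M := by
        by_contra hlt
        push Not at hlt
        exact sbAltScan0_not_before (H0.map String.toList) t M.toNat
          (by omega) ⟨g0.toList, List.mem_map.2 ⟨g0, hg0H, rfl⟩, hg0pre⟩
      -- M ≤ m
      have hMlem : M ≤ m := by
        have hmlt : m < (t.length : Int) := by omega
        obtain ⟨h, hmem, hpre⟩ := sbAltScan0_match (H0.map String.toList) t (by omega)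
        obtain ⟨g, hgH, rfl⟩ := List.mem_map.1 hmem
        have hinf : g.toList <:+: t := hpre.isInfix.trans (List.drop_suffix _ _).isInfix
        have hfne : PySem.Chars.find t g.toList ≠ -1 := by
          rw [Ne, PySem.Chars.find_eq_neg_one_iff]; simp [hinf]
        have hgL : g ∈ L := List.mem_filter.2 ⟨hgH, by simpa using hfne⟩
        have hf0 : 0 ≤ PySem.Chars.find t g.toList := by
          have := PySem.Chars.neg_one_le_find t g.toList; omega
        have hfspec := PySem.Chars.find_spec (s := t) (sub := g.toList) hf0
        have hfle : PySem.Chars.find t g.toList ≤ m := by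
          by_contra hgt
          push Not at hgt
          exact hfspec.2 m.toNat (by omega) hpre
        exact le_trans (hMle g hgL) hfle
      have : M = m := le_antisymm hMlem hmleM
      rw [this, hsn]
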